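-- pv_equiv track=rewrite | github.com/Rian-Ismael/Questoes-Python | sim6/u7/6288036662870016/diff_in.py | idiff
-- ===== SOURCE A (Python) =====
-- def meu_in(elemento, lista, j):
--     for i in range(len(lista)):
--         if lista[i] == elemento and i == j:
--             return True
--     return False
--
-- def idiff(seq1, seq2):
--     indices = []
--     if len(seq1) > len(seq2):
--         for i in range(len(seq1)):
--             if not meu_in(seq1[i], seq2, i):
--                 indices.append(i)
--     else:
--         for i in range(len(seq2)):
--             if not meu_in(seq2[i], seq1, i):
--                 indices.append(i)
--
--     return indices
-- ===== SOURCE B (Python) =====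
-- def idiff(seq1, seq2):
--     longer, shorter = (seq1, seq2) if len(seq1) > len(seq2) else (seq2, seq1)
--     res = [i for i, (x, y) in enumerate(zip(longer, shorter)) if x != y]
--     res.extend(range(len(shorter), len(longer)))
--     return res
-- ===== Notes on version B (the rewrite author's own statement) =====
-- stated objective: simpler
-- what changed: Replaces A's guarded index loop with its meu_in per-element membership scan by a direct pairwise diff over enumerate(zip(longer, shorter)) plus a range() tail extension for the extra indices.
import Mathlib
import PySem

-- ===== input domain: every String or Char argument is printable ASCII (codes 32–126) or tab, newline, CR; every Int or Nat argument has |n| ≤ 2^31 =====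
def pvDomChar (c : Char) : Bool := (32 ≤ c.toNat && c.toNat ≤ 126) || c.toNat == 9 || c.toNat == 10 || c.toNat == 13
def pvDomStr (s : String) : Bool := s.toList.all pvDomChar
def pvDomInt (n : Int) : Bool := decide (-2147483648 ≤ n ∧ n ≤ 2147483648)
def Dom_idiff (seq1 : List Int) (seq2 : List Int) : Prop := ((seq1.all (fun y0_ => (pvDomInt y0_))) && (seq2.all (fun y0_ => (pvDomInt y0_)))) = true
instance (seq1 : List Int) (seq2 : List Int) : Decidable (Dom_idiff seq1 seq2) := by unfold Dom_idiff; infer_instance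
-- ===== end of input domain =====

-- B replaces the guarded index loop + meu_in scan by a pairwise diff over the zipped
-- common prefix plus a tail of the remaining indices (simpler, and avoids the inner scan).

-- ===== PORT A =====
-- early-return loop over range(len(lista)) ported as List.any (first match wins; same Bool)
def meuIn (elemento : Int) (lista : List Int) (j : Int) : Bool :=
  (PySem.List.pyRange 0 lista.length).any
    (fun i => (PySem.List.pyGetD lista i 0 == elemento) && (i == j))

def idiff (seq1 : List Int) (seq2 : List Int) : List Int :=
  if seq1.length > seq2.length then
    (PySem.List.pyRange 0 seq1.length).foldl
      (fun acc i => if !(meuIn (PySem.List.pyGetD seq1 i 0) seq2 i) then acc ++ [i] else acc) []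
  else
    (PySem.List.pyRange 0 seq2.length).foldl
      (fun acc i => if !(meuIn (PySem.List.pyGetD seq2 i 0) seq1 i) then acc ++ [i] else acc) []

-- ===== PORT B =====
def idiff_alt (seq1 : List Int) (seq2 : List Int) : List Int :=
  let p := if seq1.length > seq2.length then (seq1, seq2) else (seq2, seq1)
  ((PySem.List.enumerate (p.1.zip p.2)).filter (fun q => !(q.2.1 == q.2.2))).map (·.1)
    ++ PySem.List.pyRange p.2.length p.1.length

-- ===== PRECONDITION & SPEC =====
def Spec_idiff (seq1 : List Int) (seq2 : List Int) (out : List Int) : Prop := out = idiff_alt seq1 seq2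
instance (seq1 : List Int) (seq2 : List Int) (out : List Int) : Decidable (Spec_idiff seq1 seq2 out) := by unfold Spec_idiff; infer_instance

-- ===== CLAIM (what is proved, stated in full; the proofs are below) =====
def Claim_equal_idiff : Prop := ∀ (seq1 : List Int) (seq2 : List Int), Dom_idiff seq1 seq2 → Spec_idiff seq1 seq2 (idiff seq1 seq2)

-- ===== LEMMAS AND PROOFS =====

lemma beq_comm_int (a b : Int) : (a == b) = (b == a) := by
  rw [Bool.eq_iff_iff]; simp only [beq_iff_eq]; exact eq_comm

lemma pyRange_add_natCast (a : Int) (n : Nat) :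
    PySem.List.pyRange a (a + n) = (List.range n).map (fun (k : Nat) => a + (k : Int)) := by
  induction n generalizing a with
  | zero => simp only [Nat.cast_zero, add_zero, List.range_zero, List.map_nil]
            simp [PySem.List.pyRange]
  | succ m ih =>
    rw [PySem.List.pyRange_one_cons (by omega), List.range_succ_eq_map]
    have h1 := ih (a + 1)
    rw [show a + ((m : Nat) + 1 : Nat) = a + 1 + (m : Nat) by push_cast; ring, h1]
    simp only [List.map_cons, List.map_map, Nat.cast_zero, add_zero, List.cons.injEq, true_and]
    exact List.map_congr_left (fun k _ => by simp only [Function.comp_apply, Nat.succ_eq_add_one]; push_cast; ring)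

lemma meuIn_natCast (e : Int) (S : List Int) (k : Nat) :
    meuIn e S (k : Int) = (decide (k < S.length) && (S.getD k 0 == e)) := by
  rw [Bool.eq_iff_iff]
  simp only [meuIn, List.any_eq_true, PySem.List.mem_pyRange_one, Bool.and_eq_true,
    beq_iff_eq, decide_eq_true_eq]
  constructor
  · rintro ⟨i, ⟨h0, h1⟩, he, rfl⟩
    rw [PySem.List.pyGetD_natCast] at he
    exact ⟨by exact_mod_cast h1, he⟩
  · rintro ⟨hk, he⟩
    exact ⟨(k : Int), ⟨by omega, by exact_mod_cast hk⟩, by rw [PySem.List.pyGetD_natCast]; exact he, rfl⟩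

lemma zip_getD (L S : List Int) (k : Nat) (h1 : k < S.length) (h2 : S.length ≤ L.length) :
    (L.zip S).getD k (0,0) = (L.getD k 0, S.getD k 0) := by
  rw [List.getD_eq_getElem _ _ (by simp; omega), List.getElem_zip,
      List.getD_eq_getElem _ _ (by omega), List.getD_eq_getElem _ _ h1]

lemma core (L S : List Int) (h : S.length ≤ L.length) :
    (PySem.List.pyRange 0 L.length).foldl
      (fun acc i => if !(meuIn (PySem.List.pyGetD L i 0) S i) then acc ++ [i] else acc) []
    = ((PySem.List.enumerate (L.zip S)).filter (fun q => !(q.2.1 == q.2.2))).map (·.1)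
      ++ PySem.List.pyRange S.length L.length := by
  rw [PySem.List.foldl_append_if_eq_filter, List.nil_append,
      PySem.List.pyRange_zero_natCast, List.filter_map]
  have hpred : ∀ k ∈ List.range L.length,
      ((fun i => !(meuIn (PySem.List.pyGetD L i 0) S i)) ∘ (fun k : Nat => (k : Int))) k
        = !(decide (k < S.length) && (S.getD k 0 == L.getD k 0)) := by
    intro k _
    simp only [Function.comp_apply, PySem.List.pyGetD_natCast, meuIn_natCast]
  rw [List.filter_congr hpred]
  rw [show List.range L.length
        = List.range S.length ++ (List.range (L.length - S.length)).map (S.length + ·) from by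
      rw [← List.range_add, Nat.add_sub_cancel' h]]
  rw [List.filter_append, List.map_append]
  congr 1
  · -- common prefix: pairwise diff over the zipped lists
    rw [PySem.List.enumerate_eq_map_pyRange (L.zip S) (0, 0)]
    have hlen : PySem.List.len (L.zip S) = (S.length : Int) := by
      simp [PySem.List.len, Nat.min_eq_right h]
    rw [hlen, PySem.List.pyRange_zero_natCast, List.map_map, List.filter_map, List.map_map]
    have hfil : List.filter
        ((fun q : Int × (Int × Int) => !(q.2.1 == q.2.2)) ∘
          ((fun j => (j, PySem.List.pyGetD (L.zip S) j (0, 0))) ∘ (fun k : Nat => (k : Int))))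
        (List.range S.length)
        = List.filter (fun k => !(decide (k < S.length) && (S.getD k 0 == L.getD k 0)))
            (List.range S.length) := by
      apply List.filter_congr
      intro k hk
      have hk' := List.mem_range.mp hk
      simp only [Function.comp_apply, PySem.List.pyGetD_natCast, zip_getD L S k hk' h,
        hk', decide_true, Bool.true_and]
      rw [beq_comm_int]
    rw [hfil]
    exact (List.map_congr_left (fun k _ => rfl)).symm
  · rw [List.filter_eq_self.mpr (by
      intro a ha
      obtain ⟨j, _, rfl⟩ := List.mem_map.mp ha
      simp)]
    have hL : (L.length : Int) = (S.length : Int) + ((L.length - S.length : Nat) : Int) := by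
      omega
    rw [hL, pyRange_add_natCast, List.map_map]
    exact List.map_congr_left (fun k _ => by simp only [Function.comp_apply]; push_cast; ring)

-- ===== VERDICT (by name: the statement is the Claim_ definition above) =====
theorem idiff_spec : Claim_equal_idiff := by
  intro seq1 seq2 _
  unfold Spec_idiff idiff idiff_alt
  by_cases h : seq1.length > seq2.length
  · simp only [h, if_pos]
    exact core seq1 seq2 (by omega)
  · simp only [h]
    exact core seq2 seq1 (by omega)
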